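-- pv_equiv track=rewrite | github.com/notlousybook/LynxLearn | examples/benchmark_nn.py | get_model_configs
-- ===== SOURCE A (Python) =====
-- from typing import Callable, Dict, List, Optional, Tuple
--
-- def get_model_configs(max_params: int) -> List[Tuple[str, List[int], int, int]]:
--     """
--     Generate model configurations up to max_params.
--     Returns: (name, layer_sizes, input_dim, expected_params)
--     """
--     configs = []
--
--     # Small models
--     configs.append(("Tiny MLP", [32], 10, 32 * 10 + 32 + 32 + 1))  # ~353 params
--
--     # Medium models
--     configs.append(("Small MLP", [64, 32], 20, None))  # ~4K params
--     configs.append(("Medium MLP", [128, 64, 32], 50, None))  # ~15K params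
--     configs.append(("Large MLP", [256, 128, 64], 100, None))  # ~65K params
--
--     # Bigger models
--     configs.append(("XL MLP", [512, 256, 128, 64], 200, None))  # ~260K params
--     configs.append(("XXL MLP", [1024, 512, 256, 128], 500, None))  # ~1.3M params
--
--     # Very large models (for CPU torture test)
--     configs.append(("Huge MLP", [2048, 1024, 512, 256], 1000, None))  # ~5.2M params
--     configs.append(("Massive MLP", [4096, 2048, 1024], 2000, None))  # ~25M params
--
--     # Filter by max_params
--     filtered = []
--     for name, layers, input_dim, expected in configs:
--         # Calculate actual params
--         params = layers[0] * input_dim + layers[0]  # First layer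
--         for i in range(1, len(layers)):
--             params += layers[i - 1] * layers[i] + layers[i]
--         params += layers[-1] + 1  # Output layer
--
--         if params <= max_params:
--             filtered.append((name, layers, input_dim, params))
--
--     return filtered
-- ===== SOURCE B (Python) =====
-- # Precomputed table + binary search: the parameter counts of the 8 fixed
-- # configs are compile-time constants and strictly increasing, so the configs
-- # with params <= max_params form a prefix; find its length by binary search.
-- _TABLE = [
--     ("Tiny MLP", [32], 10, 385),
--     ("Small MLP", [64, 32], 20, 3457),
--     ("Medium MLP", [128, 64, 32], 50, 16897),
--     ("Large MLP", [256, 128, 64], 100, 67073),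
--     ("XL MLP", [512, 256, 128, 64], 200, 275457),
--     ("XXL MLP", [1024, 512, 256, 128], 500, 1202177),
--     ("Huge MLP", [2048, 1024, 512, 256], 1000, 4804609),
--     ("Massive MLP", [4096, 2048, 1024], 2000, 18685953),
-- ]
--
-- def get_model_configs(max_params):
--     lo, hi = 0, len(_TABLE)
--     while lo < hi:
--         mid = (lo + hi) // 2
--         if _TABLE[mid][3] <= max_params:
--             lo = mid + 1
--         else:
--             hi = mid
--     return _TABLE[:lo]
-- ===== Notes on version B (the rewrite author's own statement) =====
-- stated objective: alternative
-- what changed: Since the config list is fixed, B stores each config's parameter count as a precomputed constant in a table that is (as it happens) sorted by increasing params, and replaces A's per-config parameter recomputation and filter loop with a binary search for the cutoff and a prefix slice.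
import Mathlib
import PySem

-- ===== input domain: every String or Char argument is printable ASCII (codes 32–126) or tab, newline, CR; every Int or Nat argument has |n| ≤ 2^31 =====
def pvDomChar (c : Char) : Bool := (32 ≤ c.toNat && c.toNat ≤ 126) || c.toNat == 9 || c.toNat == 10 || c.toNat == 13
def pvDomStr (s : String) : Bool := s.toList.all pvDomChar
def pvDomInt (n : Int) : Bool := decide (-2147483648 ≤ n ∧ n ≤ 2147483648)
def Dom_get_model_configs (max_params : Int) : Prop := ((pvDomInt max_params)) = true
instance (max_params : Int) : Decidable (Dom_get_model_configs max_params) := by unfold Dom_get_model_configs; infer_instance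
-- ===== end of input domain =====

-- B precomputes the 8 constant parameter counts into a table sorted by params
-- and binary-searches the cutoff instead of recomputing and filtering (return
-- value only; Python B returns aliased module-level list objects).

-- ===== PORT A =====
-- A-side: the hardcoded config table, with the unused `expected` column (Option Int)
def pvConfigsA : List (String × List Int × Int × Option Int) :=
  [("Tiny MLP", [32], 10, some (32 * 10 + 32 + 32 + 1)),
   ("Small MLP", [64, 32], 20, none),
   ("Medium MLP", [128, 64, 32], 50, none),
   ("Large MLP", [256, 128, 64], 100, none),
   ("XL MLP", [512, 256, 128, 64], 200, none),
   ("XXL MLP", [1024, 512, 256, 128], 500, none),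
   ("Huge MLP", [2048, 1024, 512, 256], 1000, none),
   ("Massive MLP", [4096, 2048, 1024], 2000, none)]

-- A's per-config parameter count: first layer, loop over range(1, len), output layer.
-- Every `layers` in pvConfigsA is nonempty, so the `.getD 0` defaults are never taken.
def pvParamsA (layers : List Int) (input_dim : Int) : Int :=
  let p0 := (PySem.List.pyGet? layers 0).getD 0 * input_dim + (PySem.List.pyGet? layers 0).getD 0
  let p1 := (PySem.List.pyRange 1 layers.length 1).foldl
    (fun p i => p + (PySem.List.pyGet? layers (i - 1)).getD 0 * (PySem.List.pyGet? layers i).getD 0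
                  + (PySem.List.pyGet? layers i).getD 0) p0
  p1 + (PySem.List.pyGet? layers (-1)).getD 0 + 1

def get_model_configs (max_params : Int) : List (String × List Int × Int × Int) :=
  pvConfigsA.foldl (fun filtered c =>
    let params := pvParamsA c.2.1 c.2.2.1
    if params ≤ max_params then filtered ++ [(c.1, c.2.1, c.2.2.1, params)] else filtered) []

-- ===== PORT B =====
-- B's precomputed table (params constants, strictly increasing)
def pvTable : List (String × List Int × Int × Int) :=
  [("Tiny MLP", [32], 10, 385),
   ("Small MLP", [64, 32], 20, 3457),
   ("Medium MLP", [128, 64, 32], 50, 16897),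
   ("Large MLP", [256, 128, 64], 100, 67073),
   ("XL MLP", [512, 256, 128, 64], 200, 275457),
   ("XXL MLP", [1024, 512, 256, 128], 500, 1202177),
   ("Huge MLP", [2048, 1024, 512, 256], 1000, 4804609),
   ("Massive MLP", [4096, 2048, 1024], 2000, 18685953)]

-- B's while-loop binary search, with fuel = hi - lo only to make it structural
-- (the loop body strictly shrinks hi - lo, so the fuel is never exhausted);
-- mid is always in range, so the `.getD` default is never taken.
def pvBS (m : Int) : Nat → Nat → Nat → Nat
  | 0, lo, _ => lo
  | fuel + 1, lo, hi =>
    if lo < hi then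
      let mid := (lo + hi) / 2
      if (pvTable.getD mid ("", [], 0, 0)).2.2.2 ≤ m then pvBS m fuel (mid + 1) hi
      else pvBS m fuel lo mid
    else lo

def get_model_configs_alt (max_params : Int) : List (String × List Int × Int × Int) :=
  pvTable.take (pvBS max_params pvTable.length 0 pvTable.length)

-- ===== PRECONDITION & SPEC =====
def Spec_get_model_configs (max_params : Int) (out : List (String × List Int × Int × Int)) : Prop := out = get_model_configs_alt max_params
instance (max_params : Int) (out : List (String × List Int × Int × Int)) : Decidable (Spec_get_model_configs max_params out) := by unfold Spec_get_model_configs; infer_instance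

-- ===== CLAIM (what is proved, stated in full; the proofs are below) =====
def Claim_equal_get_model_configs : Prop := ∀ (max_params : Int), Dom_get_model_configs max_params → Spec_get_model_configs max_params (get_model_configs max_params)

-- ===== LEMMAS AND PROOFS =====

-- ===== VERDICT (by name: the statement is the Claim_ definition above) =====
theorem get_model_configs_spec : Claim_equal_get_model_configs := by
  intro m _
  have hA0 : pvParamsA [32] 10 = 385 := by decide
  have hA1 : pvParamsA [64, 32] 20 = 3457 := by decide
  have hA2 : pvParamsA [128, 64, 32] 50 = 16897 := by decide
  have hA3 : pvParamsA [256, 128, 64] 100 = 67073 := by decide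
  have hA4 : pvParamsA [512, 256, 128, 64] 200 = 275457 := by decide
  have hA5 : pvParamsA [1024, 512, 256, 128] 500 = 1202177 := by decide
  have hA6 : pvParamsA [2048, 1024, 512, 256] 1000 = 4804609 := by decide
  have hA7 : pvParamsA [4096, 2048, 1024] 2000 = 18685953 := by decide
  unfold Spec_get_model_configs get_model_configs get_model_configs_alt
  simp only [pvConfigsA, List.foldl, hA0, hA1, hA2, hA3, hA4, hA5, hA6, hA7]
  by_cases g7 : (18685953:Int) ≤ m
  ·
    have f0 : (385:Int) ≤ m := by omega
    have f1 : (3457:Int) ≤ m := by omega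
    have f2 : (16897:Int) ≤ m := by omega
    have f3 : (67073:Int) ≤ m := by omega
    have f4 : (275457:Int) ≤ m := by omega
    have f5 : (1202177:Int) ≤ m := by omega
    have f6 : (4804609:Int) ≤ m := by omega
    have f7 : (18685953:Int) ≤ m := by omega
    simp [pvBS, pvTable, List.getD, f0, f1, f2, f3, f4, f5, f6, f7]
  by_cases g6 : (4804609:Int) ≤ m
  ·
    have f0 : (385:Int) ≤ m := by omega
    have f1 : (3457:Int) ≤ m := by omega
    have f2 : (16897:Int) ≤ m := by omega
    have f3 : (67073:Int) ≤ m := by omega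
    have f4 : (275457:Int) ≤ m := by omega
    have f5 : (1202177:Int) ≤ m := by omega
    have f6 : (4804609:Int) ≤ m := by omega
    have f7 : ¬((18685953:Int) ≤ m) := by omega
    simp [pvBS, pvTable, List.getD, f0, f1, f2, f3, f4, f5, f6, f7]
  by_cases g5 : (1202177:Int) ≤ m
  ·
    have f0 : (385:Int) ≤ m := by omega
    have f1 : (3457:Int) ≤ m := by omega
    have f2 : (16897:Int) ≤ m := by omega
    have f3 : (67073:Int) ≤ m := by omega
    have f4 : (275457:Int) ≤ m := by omega
    have f5 : (1202177:Int) ≤ m := by omega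
    have f6 : ¬((4804609:Int) ≤ m) := by omega
    have f7 : ¬((18685953:Int) ≤ m) := by omega
    simp [pvBS, pvTable, List.getD, f0, f1, f2, f3, f4, f5, f6, f7]
  by_cases g4 : (275457:Int) ≤ m
  ·
    have f0 : (385:Int) ≤ m := by omega
    have f1 : (3457:Int) ≤ m := by omega
    have f2 : (16897:Int) ≤ m := by omega
    have f3 : (67073:Int) ≤ m := by omega
    have f4 : (275457:Int) ≤ m := by omega
    have f5 : ¬((1202177:Int) ≤ m) := by omega
    have f6 : ¬((4804609:Int) ≤ m) := by omega
    have f7 : ¬((18685953:Int) ≤ m) := by omega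
    simp [pvBS, pvTable, List.getD, f0, f1, f2, f3, f4, f5, f6, f7]
  by_cases g3 : (67073:Int) ≤ m
  ·
    have f0 : (385:Int) ≤ m := by omega
    have f1 : (3457:Int) ≤ m := by omega
    have f2 : (16897:Int) ≤ m := by omega
    have f3 : (67073:Int) ≤ m := by omega
    have f4 : ¬((275457:Int) ≤ m) := by omega
    have f5 : ¬((1202177:Int) ≤ m) := by omega
    have f6 : ¬((4804609:Int) ≤ m) := by omega
    have f7 : ¬((18685953:Int) ≤ m) := by omega
    simp [pvBS, pvTable, List.getD, f0, f1, f2, f3, f4, f5, f6, f7]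
  by_cases g2 : (16897:Int) ≤ m
  ·
    have f0 : (385:Int) ≤ m := by omega
    have f1 : (3457:Int) ≤ m := by omega
    have f2 : (16897:Int) ≤ m := by omega
    have f3 : ¬((67073:Int) ≤ m) := by omega
    have f4 : ¬((275457:Int) ≤ m) := by omega
    have f5 : ¬((1202177:Int) ≤ m) := by omega
    have f6 : ¬((4804609:Int) ≤ m) := by omega
    have f7 : ¬((18685953:Int) ≤ m) := by omega
    simp [pvBS, pvTable, List.getD, f0, f1, f2, f3, f4, f5, f6, f7]
  by_cases g1 : (3457:Int) ≤ m
  ·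
    have f0 : (385:Int) ≤ m := by omega
    have f1 : (3457:Int) ≤ m := by omega
    have f2 : ¬((16897:Int) ≤ m) := by omega
    have f3 : ¬((67073:Int) ≤ m) := by omega
    have f4 : ¬((275457:Int) ≤ m) := by omega
    have f5 : ¬((1202177:Int) ≤ m) := by omega
    have f6 : ¬((4804609:Int) ≤ m) := by omega
    have f7 : ¬((18685953:Int) ≤ m) := by omega
    simp [pvBS, pvTable, List.getD, f0, f1, f2, f3, f4, f5, f6, f7]
  by_cases g0 : (385:Int) ≤ m
  ·
    have f0 : (385:Int) ≤ m := by omega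
    have f1 : ¬((3457:Int) ≤ m) := by omega
    have f2 : ¬((16897:Int) ≤ m) := by omega
    have f3 : ¬((67073:Int) ≤ m) := by omega
    have f4 : ¬((275457:Int) ≤ m) := by omega
    have f5 : ¬((1202177:Int) ≤ m) := by omega
    have f6 : ¬((4804609:Int) ≤ m) := by omega
    have f7 : ¬((18685953:Int) ≤ m) := by omega
    simp [pvBS, pvTable, List.getD, f0, f1, f2, f3, f4, f5, f6, f7]
  have f0 : ¬((385:Int) ≤ m) := by omega
  have f1 : ¬((3457:Int) ≤ m) := by omega
  have f2 : ¬((16897:Int) ≤ m) := by omega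
  have f3 : ¬((67073:Int) ≤ m) := by omega
  have f4 : ¬((275457:Int) ≤ m) := by omega
  have f5 : ¬((1202177:Int) ≤ m) := by omega
  have f6 : ¬((4804609:Int) ≤ m) := by omega
  have f7 : ¬((18685953:Int) ≤ m) := by omega
  simp [pvBS, pvTable, List.getD, f0, f1, f2, f3, f4, f5, f6, f7]
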